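-- pv_equiv track=rewrite | github.com/shashank19105/Sequence-Alignment | local_2019105.py | scoreThis
-- ===== SOURCE A (Python) =====
-- match = 2
--
-- mismatch = -1
--
-- gap = -2
--
-- def scoreThis(s1,s2): #finding score by comparing the two strings
--     score = 0
--     for i in range(len(s1)):
--         if s1[i] == "_" or s2[i] == "_":
--             score += gap
--         elif s1[i] != s2[i]:
--             score += mismatch
--         elif s1[i] == s2[i]:
--             score += match
--     return score
-- ===== SOURCE B (Python) =====
-- def scoreThis(s1, s2):
--     n = len(s1)
--     gaps = sum(1 for i in range(n) if s1[i] == "_" or s2[i] == "_")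
--     mismatches = sum(1 for i in range(n)
--                      if not (s1[i] == "_" or s2[i] == "_") and s1[i] != s2[i])
--     matches = sum(1 for i in range(n)
--                   if not (s1[i] == "_" or s2[i] == "_") and s1[i] == s2[i])
--     return 2 * matches - mismatches - 2 * gaps
-- ===== Notes on version B (the rewrite author's own statement) =====
-- stated objective: alternative
-- what changed: Replaces the single accumulating loop by three independent counting passes (gaps, mismatches, matches) combined in one closed-form expression 2*matches - mismatches - 2*gaps.
import Mathlib
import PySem

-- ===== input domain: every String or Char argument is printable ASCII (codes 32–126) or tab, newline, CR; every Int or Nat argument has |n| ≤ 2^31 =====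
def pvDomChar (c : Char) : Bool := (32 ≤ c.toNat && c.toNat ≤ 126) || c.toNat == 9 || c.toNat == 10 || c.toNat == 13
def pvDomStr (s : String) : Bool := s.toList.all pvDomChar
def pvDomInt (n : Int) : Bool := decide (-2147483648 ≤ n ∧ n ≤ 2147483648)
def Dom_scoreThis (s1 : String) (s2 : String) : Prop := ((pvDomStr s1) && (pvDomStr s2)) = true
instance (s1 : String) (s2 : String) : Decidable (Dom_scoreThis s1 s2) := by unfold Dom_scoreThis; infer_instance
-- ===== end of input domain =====

-- B replaces A's single accumulating loop by three independent counting passes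
-- (gaps, mismatches, matches) combined as 2*matches - mismatches - 2*gaps (alternative decomposition, same cost).

-- ===== PORT A =====
-- A's loop: score starts at 0; for each i in range(len(s1)) add gap/mismatch/match.
-- s2[i] is read only when s1[i] != '_' (Python's `or` short-circuits); under Pre_ every
-- such read is in range, so the `.getD '!'` default is never the value Python would not see.
def scoreThis (s1 : String) (s2 : String) : Int :=
  (PySem.List.pyRange 0 (Int.ofNat s1.toList.length) 1).foldl
    (fun score i =>
      let c1 := (PySem.Str.pyGet? s1 i).getD '!'
      if c1 = '_' then score + (-2)
      else
        let c2 := (PySem.Str.pyGet? s2 i).getD '!'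
        if c2 = '_' then score + (-2)
        else if c1 ≠ c2 then score + (-1)
        else if c1 = c2 then score + 2
        else score) 0

-- ===== PORT B =====
-- three counting passes over range(len(s1)), then the closed-form combination
def scoreThis_alt (s1 : String) (s2 : String) : Int :=
  let r := PySem.List.pyRange 0 (Int.ofNat s1.toList.length) 1
  let c1 := fun i => (PySem.Str.pyGet? s1 i).getD '!'
  let c2 := fun i => (PySem.Str.pyGet? s2 i).getD '!'
  let gaps : Int := r.countP (fun i => c1 i = '_' || c2 i = '_')
  let mismatches : Int := r.countP (fun i => !(c1 i = '_' || c2 i = '_') && c1 i ≠ c2 i)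
  let nmatch : Int := r.countP (fun i => !(c1 i = '_' || c2 i = '_') && c1 i = c2 i)
  2 * nmatch - mismatches - 2 * gaps

-- ===== PRECONDITION & SPEC =====
-- Pre_ excludes exactly the inputs where Python raises IndexError (both A and B read s2[i]
-- for some i < len(s1) with s1[i] != '_' and i >= len(s2)); both programs raise there.
def Pre_scoreThis (s1 : String) (s2 : String) : Prop :=
  ∀ i < s1.toList.length, s1.toList[i]? = some '_' ∨ i < s2.toList.length
instance (s1 : String) (s2 : String) : Decidable (Pre_scoreThis s1 s2) := by
  unfold Pre_scoreThis; infer_instance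
def pvWitness_scoreThis : String × String := ("ab_c", "abxd")

def Spec_scoreThis (s1 : String) (s2 : String) (out : Int) : Prop := out = scoreThis_alt s1 s2
instance (s1 : String) (s2 : String) (out : Int) : Decidable (Spec_scoreThis s1 s2 out) := by
  unfold Spec_scoreThis; infer_instance

-- ===== CLAIM (what is proved, stated in full; the proofs are below) =====
def Claim_equal_scoreThis : Prop := ∀ (s1 : String) (s2 : String), Dom_scoreThis s1 s2 → Pre_scoreThis s1 s2 → Spec_scoreThis s1 s2 (scoreThis s1 s2)

-- ===== LEMMAS AND PROOFS =====

-- A's fold over any index list equals B's closed-form combination of the three counts.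
lemma scoreThis_fold_counts (c1 c2 : Int → Char) (l : List Int) (a : Int) :
    l.foldl
      (fun score i =>
        if c1 i = '_' then score + (-2)
        else
          if c2 i = '_' then score + (-2)
          else if c1 i ≠ c2 i then score + (-1)
          else if c1 i = c2 i then score + 2
          else score) a
    = a + 2 * (l.countP (fun i => !(c1 i = '_' || c2 i = '_') && c1 i = c2 i) : Int)
        - (l.countP (fun i => !(c1 i = '_' || c2 i = '_') && c1 i ≠ c2 i) : Int)
        - 2 * (l.countP (fun i => c1 i = '_' || c2 i = '_') : Int) := by
  induction l generalizing a with
  | nil => simp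
  | cons x xs ih =>
    simp only [List.foldl_cons, List.countP_cons, ih]
    by_cases h1 : c1 x = '_' <;> by_cases h2 : c2 x = '_' <;> by_cases h3 : c1 x = c2 x <;>
      simp [h1, h2, h3] <;> omega

-- ===== VERDICT (by name: the statement is the Claim_ definition above) =====
theorem scoreThis_spec : Claim_equal_scoreThis := by
  intro s1 s2 _ _
  unfold Spec_scoreThis scoreThis scoreThis_alt
  rw [scoreThis_fold_counts]
  ring
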